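-- pv_equiv track=rewrite | github.com/huntzhan/DRCD | scripts/t2s_squad.py | t2s_answer_start
-- ===== SOURCE A (Python) =====
-- def t2s_answer_start(context_hans, answer_hans, answer_start):
--     '''
--     return
--     '''
--     all_starts = []
--     start = 0
--     while True:
--         start = context_hans.find(answer_hans, start)
--         if start < 0:
--             break
--         all_starts.append(start)
--         start += len(answer_hans)
--
--     if not all_starts:
--         return None
--
--     closest_idx = 0
--     closest_diff = float('inf')
--     for start in all_starts:
--         diff = abs(answer_start - start)
--         if diff < closest_diff:
--             closest_diff = diff
--             closest_idx = start
--
--     return closest_idx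
-- ===== SOURCE B (Python) =====
-- def t2s_answer_start(context_hans, answer_hans, answer_start):
--     # Split-based: cut the context on the answer; the occurrence positions are
--     # the running sums of piece lengths, then pick the closest with min(key=...).
--     pieces = context_hans.split(answer_hans)
--     if len(pieces) == 1:
--         return None
--     positions = []
--     pos = 0
--     for piece in pieces[:-1]:
--         pos += len(piece)
--         positions.append(pos)
--         pos += len(answer_hans)
--     return min(positions, key=lambda p: abs(answer_start - p))
-- ===== Notes on version B (the rewrite author's own statement) =====
-- stated objective: alternative
-- what changed: Replaces A's repeated context.find loop plus a second closest-scan over the collected list by context.split(answer_hans): occurrence positions are recovered as prefix sums of the split pieces' lengths and the closest one is picked with min(key=distance).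
import Mathlib
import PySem

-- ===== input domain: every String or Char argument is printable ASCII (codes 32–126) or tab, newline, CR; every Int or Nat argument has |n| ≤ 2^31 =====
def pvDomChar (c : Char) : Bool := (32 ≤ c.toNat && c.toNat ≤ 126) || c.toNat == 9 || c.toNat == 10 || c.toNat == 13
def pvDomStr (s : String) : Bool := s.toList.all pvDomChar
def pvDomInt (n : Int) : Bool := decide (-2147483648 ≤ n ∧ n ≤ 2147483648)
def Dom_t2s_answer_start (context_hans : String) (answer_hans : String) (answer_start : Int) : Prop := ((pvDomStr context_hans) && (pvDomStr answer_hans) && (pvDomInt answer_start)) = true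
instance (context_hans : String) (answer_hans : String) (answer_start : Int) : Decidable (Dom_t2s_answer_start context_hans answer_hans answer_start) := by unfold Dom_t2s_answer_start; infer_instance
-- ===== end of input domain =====

-- B replaces A's repeated-find loop by split(answer_hans) + prefix-sum positions + min(key=distance) (objective: alternative).

-- ===== PORT A =====
-- A's `while True: find` loop collecting all occurrence starts.  Fuel only makes the
-- recursion total: with answer_hans nonempty each found start strictly increases, so
-- context length + 1 iterations always suffice (the loop exits via the `s < 0` test).
def pvFindAllA (ctx sub : String) (start : Int) (acc : List Int) : Nat → List Int
  | 0 => acc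
  | fuel + 1 =>
    let s := PySem.Str.findFrom ctx sub start
    if s < 0 then acc
    else pvFindAllA ctx sub (s + PySem.Str.len sub) (acc ++ [s]) fuel

-- A's second phase: one step of the `for start in all_starts` loop; closest_diff is
-- `Option Int` with `none` = float('inf') (any int diff is < inf).
def pvStepA (ans : Int) (st : Option Int × Int) (s : Int) : Option Int × Int :=
  let diff := |ans - s|
  let takes := match st.1 with | none => true | some d => decide (diff < d)
  if takes then (some diff, s) else st

def t2s_answer_start (context_hans : String) (answer_hans : String) (answer_start : Int) : Option Int :=
  let all_starts := pvFindAllA context_hans answer_hans 0 [] (context_hans.length + 1)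
  if all_starts = [] then none
  else some (List.foldl (pvStepA answer_start) (none, 0) all_starts).2

-- ===== PORT B =====
-- Source B: pieces = context.split(answer); positions by prefix sums of piece lengths;
-- min(positions, key=lambda p: abs(answer_start - p)).
def t2s_answer_start_alt (context_hans : String) (answer_hans : String) (answer_start : Int) : Option Int :=
  match PySem.Str.split? context_hans answer_hans with
  | none => none   -- answer_hans = '': Python's split raises ValueError; excluded by Pre_
  | some pieces =>
    if pieces.length = 1 then none
    else
      let st := pieces.dropLast.foldl
        (fun (st : Int × List Int) piece =>
          let pos := st.1 + PySem.Str.len piece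
          (pos + PySem.Str.len answer_hans, st.2 ++ [pos]))
        (0, [])
      PySem.List.min? st.2 (fun p => |answer_start - p|)

-- ===== PRECONDITION & SPEC =====
-- Pre_ excludes only answer_hans = "", where A never returns (its find('' , start) loop runs forever).
def Pre_t2s_answer_start (context_hans : String) (answer_hans : String) (answer_start : Int) : Prop :=
  answer_hans ≠ ""
instance (context_hans : String) (answer_hans : String) (answer_start : Int) : Decidable (Pre_t2s_answer_start context_hans answer_hans answer_start) := by unfold Pre_t2s_answer_start; infer_instance

def pvWitness_t2s_answer_start : String × String × Int := ("aba", "a", 2)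

def Spec_t2s_answer_start (context_hans : String) (answer_hans : String) (answer_start : Int) (out : Option Int) : Prop := out = t2s_answer_start_alt context_hans answer_hans answer_start
instance (context_hans : String) (answer_hans : String) (answer_start : Int) (out : Option Int) : Decidable (Spec_t2s_answer_start context_hans answer_hans answer_start out) := by unfold Spec_t2s_answer_start; infer_instance

-- ===== CLAIM =====
def Claim_equal_t2s_answer_start : Prop := ∀ (context_hans : String) (answer_hans : String) (answer_start : Int), Dom_t2s_answer_start context_hans answer_hans answer_start → Pre_t2s_answer_start context_hans answer_hans answer_start → Spec_t2s_answer_start context_hans answer_hans answer_start (t2s_answer_start context_hans answer_hans answer_start)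

-- ===== LEMMAS AND PROOFS =====

-- A's collector with accumulator = accumulator ++ collector started empty.
theorem pvFindAllA_acc (ctx sub : String) : ∀ (fuel : Nat) (start : Int) (acc : List Int),
    pvFindAllA ctx sub start acc fuel = acc ++ pvFindAllA ctx sub start [] fuel := by
  intro fuel
  induction fuel with
  | zero => intro start acc; simp [pvFindAllA]
  | succ n ih =>
    intro start acc
    simp only [pvFindAllA]
    generalize PySem.Str.findFrom ctx sub start = s
    split_ifs with h
    · simp
    · rw [ih _ (acc ++ [s]), ih _ ([] ++ [s])]
      simp

-- find l sub = j when sub occurs (as a prefix of a suffix) first at j.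
theorem pvFind_eq_of (l sub : List Char) (j : Nat) (hj : sub <+: l.drop j)
    (hmin : ∀ i < j, ¬ sub <+: l.drop i) : PySem.Chars.find l sub = (j : Int) := by
  have hinf : sub <:+: l := (PySem.Chars.isIn_iff_infix sub l).mp
    ((PySem.Chars.exists_prefix_drop_iff_isIn sub l).mp ⟨j, hj⟩)
  have hnn : 0 ≤ PySem.Chars.find l sub := (PySem.Chars.find_nonneg_iff l sub).mpr hinf
  obtain ⟨hpre, hm⟩ := PySem.Chars.find_spec hnn
  rcases lt_trichotomy (PySem.Chars.find l sub).toNat j with h | h | h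
  · exact absurd hpre (hmin _ h)
  · omega
  · exact absurd hj (hm _ h)

-- shift of find over one non-matching leading char
theorem pvFind_cons (c : Char) (rest sub : List Char) (hnp : ¬ sub <+: (c :: rest)) :
    PySem.Chars.find (c :: rest) sub =
      if PySem.Chars.find rest sub = -1 then -1 else PySem.Chars.find rest sub + 1 := by
  split_ifs with h
  · have hni : ¬ sub <:+: rest := (PySem.Chars.find_eq_neg_one_iff rest sub).mp h
    refine (PySem.Chars.find_eq_neg_one_iff _ sub).mpr ?_
    intro hinf
    obtain ⟨j, hj⟩ := (PySem.Chars.exists_prefix_drop_iff_isIn sub (c :: rest)).mpr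
      ((PySem.Chars.isIn_iff_infix sub (c :: rest)).mpr hinf)
    cases j with
    | zero => exact hnp (by simpa using hj)
    | succ j' =>
      exact hni ((PySem.Chars.isIn_iff_infix sub rest).mp
        ((PySem.Chars.exists_prefix_drop_iff_isIn sub rest).mp ⟨j', by simpa using hj⟩))
  · have hnn : 0 ≤ PySem.Chars.find rest sub := by
      have := PySem.Chars.neg_one_le_find (s := rest) (sub := sub)
      omega
    obtain ⟨hpre, hm⟩ := PySem.Chars.find_spec hnn
    have := pvFind_eq_of (c :: rest) sub ((PySem.Chars.find rest sub).toNat + 1)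
      (by simpa using hpre)
      (by
        intro i hi
        cases i with
        | zero => simpa using hnp
        | succ i' => exact fun hp => hm i' (by omega) (by simpa using hp))
    omega

-- the pieces produced by str.split (answer nonempty), by occurrence recursion
def pvPieces (sub : List Char) (l : List Char) : List (List Char) :=
  if h : PySem.Chars.find l sub < 0 ∨ sub.length = 0 then [l]
  else (l.take (PySem.Chars.find l sub).toNat) ::
    pvPieces sub (l.drop ((PySem.Chars.find l sub).toNat + sub.length))
termination_by l.length
decreasing_by
  push_neg at h
  have hinf : sub <:+: l := (PySem.Chars.find_nonneg_iff l sub).mp (by omega)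
  have := hinf.length_le
  simp only [List.length_drop]
  omega

theorem pvPieces_ne_nil (sub l : List Char) : pvPieces sub l ≠ [] := by
  rw [pvPieces]
  split_ifs <;> simp

-- splitOn's char-scan equals the occurrence recursion
theorem pvGo_eq (sub : List Char) (hs : sub ≠ []) :
    ∀ (fuel : Nat) (l cur : List Char) (acc : List (List Char)), l.length < fuel →
      PySem.Chars.splitOn.go sub fuel l cur acc
        = acc.reverse ++ (pvPieces sub l).modifyHead (cur.reverse ++ ·) := by
  intro fuel
  induction fuel with
  | zero => intro l cur acc h; omega
  | succ n ih =>
    intro l cur acc hlen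
    cases l with
    | nil =>
      have hf : PySem.Chars.find [] sub = -1 := by
        refine (PySem.Chars.find_eq_neg_one_iff _ sub).mpr ?_
        intro hinf
        have := hinf.length_le
        have : sub = [] := by
          cases sub with | nil => rfl | cons a t => simp at this
        exact hs this
      rw [PySem.Chars.splitOn.go]
      · rw [pvPieces]
        simp [hf]
      · omega
    | cons c rest =>
      rw [PySem.Chars.splitOn.go]
      by_cases hp : sub.isPrefixOf (c :: rest) = true
      · simp only [hp, if_true]
        have hpre : sub <+: (c :: rest) := List.isPrefixOf_iff_prefix.mp hp
        have hf0 : PySem.Chars.find (c :: rest) sub = 0 := by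
          have := pvFind_eq_of (c :: rest) sub 0 (by simpa using hpre) (by omega)
          simpa using this
        have hdroplen : (List.drop sub.length (c :: rest)).length < n := by
          have h1 : 0 < sub.length := List.length_pos_iff.mpr hs
          simp only [List.length_drop, List.length_cons]
          simp only [List.length_cons] at hlen
          omega
        rw [ih _ [] (cur.reverse :: acc) hdroplen]
        obtain ⟨q, ps, hqs⟩ : ∃ q ps, pvPieces sub (List.drop sub.length (c :: rest)) = q :: ps := by
          cases h' : pvPieces sub (List.drop sub.length (c :: rest)) with
          | nil => exact absurd h' (pvPieces_ne_nil _ _)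
          | cons q ps => exact ⟨q, ps, rfl⟩
        conv_rhs => rw [pvPieces]
        simp [hf0, hs, hqs, List.modifyHead]
      · simp only [hp, if_false]
        have hnp : ¬ sub <+: (c :: rest) := fun hpre => hp (List.isPrefixOf_iff_prefix.mpr hpre)
        have hfc := pvFind_cons c rest sub hnp
        rw [ih rest (c :: cur) acc (by simp at hlen ⊢; omega)]
        by_cases hneg : PySem.Chars.find rest sub = -1
        · have hneg' : PySem.Chars.find (c :: rest) sub = -1 := by rw [hfc]; simp [hneg]
          conv_rhs => rw [pvPieces]
          conv_lhs => rw [pvPieces]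
          simp [hneg, hneg']
        · have hnn : 0 ≤ PySem.Chars.find rest sub := by
            have := PySem.Chars.neg_one_le_find (s := rest) (sub := sub)
            omega
          have hfc' : PySem.Chars.find (c :: rest) sub = PySem.Chars.find rest sub + 1 := by
            rw [hfc]; simp [hneg]
          conv_rhs => rw [pvPieces]
          conv_lhs => rw [pvPieces]
          rw [hfc']
          have h1 : ¬ (PySem.Chars.find rest sub < 0 ∨ sub.length = 0) := by
            push_neg
            constructor
            · omega
            · cases sub with | nil => exact absurd rfl hs | cons a t => simp
          have h2 : ¬ (PySem.Chars.find rest sub + 1 < 0 ∨ sub.length = 0) := by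
            push_neg at h1 ⊢
            exact ⟨by omega, h1.2⟩
          simp only [h1, h2, dif_neg, not_false_iff]
          have ht : (PySem.Chars.find rest sub + 1).toNat = (PySem.Chars.find rest sub).toNat + 1 := by omega
          rw [ht]
          simp [List.modifyHead]
          rw [show (PySem.Chars.find rest sub).toNat + 1 + sub.length
                = ((PySem.Chars.find rest sub).toNat + sub.length) + 1 by omega,
            List.drop_succ_cons]

-- positions read off a pieces list: prefix sums of lengths, separated by m
def pvPosOf (m : Nat) : List (List Char) → Int → List Int
  | [], _ => []
  | [_], _ => []
  | p :: q :: ps, k => (k + (p.length : Int)) :: pvPosOf m (q :: ps) (k + p.length + m)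

theorem pvPosOf_cons₂ (m : Nat) (p q : List Char) (ps : List (List Char)) (k : Int) :
    pvPosOf m (p :: q :: ps) k = (k + (p.length : Int)) :: pvPosOf m (q :: ps) (k + p.length + m) := rfl

-- A's find loop computes exactly the positions read off the pieces
theorem pvA_eq (ctx sub : String) (hs : sub.toList ≠ []) :
    ∀ (fuel : Nat) (k : Nat), k ≤ ctx.toList.length → ctx.toList.length - k < fuel →
      pvFindAllA ctx sub (k : Int) [] fuel
        = pvPosOf sub.toList.length (pvPieces sub.toList (ctx.toList.drop k)) (k : Int) := by
  intro fuel
  induction fuel with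
  | zero => intro k h1 h2; omega
  | succ n ih =>
    intro k hk hfuel
    rw [pvFindAllA]
    simp only [PySem.Str.findFrom_eq]
    rw [PySem.Chars.findFrom_natCast ctx.toList sub.toList k hk]
    by_cases hneg : PySem.Chars.find (ctx.toList.drop k) sub.toList = -1
    · simp only [hneg, if_true]
      rw [pvPieces]
      simp [hneg, pvPosOf]
    · have hnn : 0 ≤ PySem.Chars.find (ctx.toList.drop k) sub.toList := by
        have := PySem.Chars.neg_one_le_find (s := ctx.toList.drop k) (sub := sub.toList)
        omega
      set j := (PySem.Chars.find (ctx.toList.drop k) sub.toList).toNat with hj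
      have hjf : PySem.Chars.find (ctx.toList.drop k) sub.toList = (j : Int) := by omega
      obtain ⟨hpre, _⟩ := PySem.Chars.find_spec hnn
      have hsubineq : j + sub.toList.length ≤ (ctx.toList.drop k).length := by
        have h1 := hpre.length_le
        simp only [List.length_drop] at h1 ⊢
        have hjl : j ≤ (ctx.toList.drop k).length := by
          have := PySem.Chars.find_le_length (ctx.toList.drop k) sub.toList
          simp only [List.length_drop] at this ⊢
          omega
        simp only [List.length_drop] at hjl
        omega
      simp only [List.length_drop] at hsubineq
      have hcond : ¬ ((k : Int) + PySem.Chars.find (ctx.toList.drop k) sub.toList < 0) := by omega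
      simp only [if_neg hneg, if_neg hcond]
      rw [pvFindAllA_acc]
      have hk' : k + j + sub.toList.length ≤ ctx.toList.length := by omega
      have hfuel' : ctx.toList.length - (k + j + sub.toList.length) < n := by
        have hs1 : 1 ≤ sub.toList.length := by
          cases h : sub.toList with
          | nil => exact absurd h hs
          | cons a t => simp
        omega
      have harg : (k : Int) + PySem.Chars.find (ctx.toList.drop k) sub.toList + PySem.Str.len sub
          = ((k + j + sub.toList.length : Nat) : Int) := by
        rw [hjf, PySem.Str.len_eq]
        push_cast
        ring
      rw [harg, ih (k + j + sub.toList.length) hk' hfuel']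
      conv_rhs => rw [pvPieces]
      have hgd : ¬ (PySem.Chars.find (ctx.toList.drop k) sub.toList < 0 ∨ sub.toList.length = 0) := by
        push_neg
        refine ⟨by omega, ?_⟩
        cases h : sub.toList with
        | nil => exact absurd h hs
        | cons a t => simp
      rw [dif_neg hgd]
      rw [List.drop_drop]
      obtain ⟨q, ps, hqs⟩ : ∃ q ps,
          pvPieces sub.toList (ctx.toList.drop (k + (j + sub.toList.length))) = q :: ps := by
        cases h : pvPieces sub.toList (ctx.toList.drop (k + (j + sub.toList.length))) with
        | nil => exact absurd h (pvPieces_ne_nil _ _)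
        | cons q ps => exact ⟨q, ps, rfl⟩
      have htk : ((ctx.toList.drop k).take j).length = j := by
        simp only [List.length_take, List.length_drop]
        omega
      have hqs2 : pvPieces sub.toList (ctx.toList.drop (k + j + sub.toList.length)) = q :: ps := by
        rw [show k + j + sub.toList.length = k + (j + sub.toList.length) from by omega]
        exact hqs
      rw [← hj, hqs, hqs2, pvPosOf_cons₂, htk, hjf]
      simp only [List.nil_append, List.cons_append]
      congr 1

-- B's prefix-sum fold over pieces[:-1] = pvPosOf
theorem pvFoldB (subS : String) : ∀ (ps : List (List Char)) (k : Int) (acc : List Int),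
    (((ps.map String.ofList).dropLast).foldl
        (fun (st : Int × List Int) piece =>
          let pos := st.1 + PySem.Str.len piece
          (pos + PySem.Str.len subS, st.2 ++ [pos]))
        (k, acc)).2
      = acc ++ pvPosOf subS.toList.length ps k := by
  intro ps
  induction ps with
  | nil => intro k acc; simp [pvPosOf]
  | cons p ps ih =>
    intro k acc
    cases ps with
    | nil => simp [pvPosOf]
    | cons q ps' =>
      simp only [List.map_cons, List.dropLast_cons₂, List.foldl_cons]
      have hstep := ih (k + PySem.Str.len (String.ofList p) + PySem.Str.len subS)
        (acc ++ [k + PySem.Str.len (String.ofList p)])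
      simp only [List.map_cons] at hstep
      rw [hstep]
      rw [pvPosOf]
      have hlen : PySem.Str.len (String.ofList p) = (p.length : Int) := by
        rw [PySem.Str.len_eq]; simp
      have hlens : PySem.Str.len subS = (subS.toList.length : Int) := PySem.Str.len_eq subS
      rw [hlen, hlens]
      simp [List.append_assoc]

-- A's running (closest_diff, closest_idx) fold vs Python min(key=...)
def pvMinStep (ans : Int) (acc : Option Int) (x : Int) : Option Int :=
  match acc with
  | none => some x
  | some m => if |ans - x| < |ans - m| then some x else some m

theorem pvMinFold (ans : Int) : ∀ (L : List Int) (st : Option Int × Int),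
    (∀ d, st.1 = some d → d = |ans - st.2|) →
    List.foldl (pvMinStep ans) (st.1.map (fun _ => st.2)) L
      = (List.foldl (pvStepA ans) st L).1.map (fun _ => (List.foldl (pvStepA ans) st L).2) := by
  intro L
  induction L with
  | nil => intro st h; rfl
  | cons x L ih =>
    intro st hinv
    simp only [List.foldl_cons]
    obtain ⟨cd, ci⟩ := st
    cases cd with
    | none =>
      have h1 : pvStepA ans (none, ci) x = (some |ans - x|, x) := by simp [pvStepA]
      have h2 : pvMinStep ans (Option.map (fun _ => ci) (none : Option Int)) x = some x := by
        simp [pvMinStep]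
      rw [h1, h2]
      have h3 := ih (some |ans - x|, x) (by intro d hd; simpa using hd.symm)
      simpa using h3
    | some d =>
      have hd : d = |ans - ci| := hinv d rfl
      by_cases hlt : |ans - x| < d
      · have h1 : pvStepA ans (some d, ci) x = (some |ans - x|, x) := by simp [pvStepA, hlt]
        have h2 : pvMinStep ans (Option.map (fun _ => ci) (some d)) x = some x := by
          simp only [Option.map_some, pvMinStep]
          rw [if_pos (by rw [← hd]; exact hlt)]
        rw [h1, h2]
        have h3 := ih (some |ans - x|, x) (by intro d' hd'; simpa using hd'.symm)
        simpa using h3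
      · have h1 : pvStepA ans (some d, ci) x = (some d, ci) := by simp [pvStepA, hlt]
        have h2 : pvMinStep ans (Option.map (fun _ => ci) (some d)) x = some ci := by
          simp only [Option.map_some, pvMinStep]
          rw [if_neg (by rw [← hd]; exact hlt)]
        rw [h1, h2]
        have h3 := ih (some d, ci) hinv
        simpa using h3

-- after folding a nonempty list, closest_diff is set
theorem pvFoldl_isSome (ans : Int) : ∀ (L : List Int) (st : Option Int × Int) (x : Int),
    (List.foldl (pvStepA ans) st (x :: L)).1.isSome := by
  intro L
  induction L with
  | nil =>
    intro st x
    obtain ⟨cd, ci⟩ := st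
    cases cd with
    | none => simp [pvStepA]
    | some d => by_cases h : |ans - x| < d <;> simp [pvStepA, h]
  | cons y L ih =>
    intro st x
    simpa [List.foldl] using ih (pvStepA ans st x) y

-- Python min(positions, key=...) as a map of A's running fold state
theorem pvMin_eq_fold (ans : Int) (L : List Int) :
    PySem.List.min? L (fun p => |ans - p|)
      = (List.foldl (pvStepA ans) (none, 0) L).1.map
          (fun _ => (List.foldl (pvStepA ans) (none, 0) L).2) := by
  have h := pvMinFold ans L ((none : Option Int), (0 : Int)) (by intro d hd; cases hd)
  have hbridge : PySem.List.min? L (fun p => |ans - p|)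
      = List.foldl (pvMinStep ans) none L := by
    rw [PySem.List.min?]
    exact List.foldl_ext _ _ none (by intro a b _; cases a <;> rfl)
  rw [hbridge]
  simpa using h

theorem pvFold_map_eq (ans : Int) (x : Int) (L : List Int) :
    (List.foldl (pvStepA ans) (none, 0) (x :: L)).1.map
        (fun _ => (List.foldl (pvStepA ans) (none, 0) (x :: L)).2)
      = some (List.foldl (pvStepA ans) (none, 0) (x :: L)).2 := by
  have hS := pvFoldl_isSome ans L (none, 0) x
  cases h' : (List.foldl (pvStepA ans) ((none : Option Int), (0 : Int)) (x :: L)).1 with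
  | none => rw [h'] at hS; cases hS
  | some d => rfl

-- ===== VERDICT =====
theorem t2s_answer_start_spec : Claim_equal_t2s_answer_start := by
  intro ctx sub ans _ hpre
  unfold Spec_t2s_answer_start t2s_answer_start t2s_answer_start_alt
  have hs : sub.toList ≠ [] := by
    intro h
    exact hpre (by
      have h2 := congrArg String.ofList h
      simpa using h2)
  have hlenc : ctx.length = ctx.toList.length := by simp
  have hA : pvFindAllA ctx sub 0 [] (ctx.length + 1)
      = pvPosOf sub.toList.length (pvPieces sub.toList ctx.toList) 0 := by
    have h0 := pvA_eq ctx sub hs (ctx.length + 1) 0 (by omega) (by omega)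
    simpa using h0
  have hP : PySem.Chars.splitOn ctx.toList sub.toList = pvPieces sub.toList ctx.toList := by
    rw [PySem.Chars.splitOn]
    rw [pvGo_eq sub.toList hs (ctx.toList.length + 1) ctx.toList [] [] (by omega)]
    cases h : pvPieces sub.toList ctx.toList with
    | nil => exact absurd h (pvPieces_ne_nil _ _)
    | cons qq pp => simp [List.modifyHead]
  have hsplit : PySem.Str.split? ctx sub
      = some ((pvPieces sub.toList ctx.toList).map String.ofList) := by
    rw [PySem.Str.split?, PySem.Chars.split?]
    rw [if_neg (by simp [hs])]
    rw [hP]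
    rfl
  cases hPP : pvPieces sub.toList ctx.toList with
  | nil => exact absurd hPP (pvPieces_ne_nil _ _)
  | cons p ps =>
    rw [hPP] at hA hsplit
    cases ps with
    | nil =>
      rw [hA, hsplit]
      simp [pvPosOf]
    | cons q ps' =>
      rw [hA, hsplit]
      rw [if_neg (by rw [pvPosOf_cons₂]; simp)]
      show some (List.foldl (pvStepA ans) (none, 0) (pvPosOf sub.toList.length (p :: q :: ps') 0)).2
          = if (List.map String.ofList (p :: q :: ps')).length = 1 then none
            else PySem.List.min?
              ((((p :: q :: ps').map String.ofList).dropLast).foldl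
                (fun (st : Int × List Int) piece =>
                  let pos := st.1 + PySem.Str.len piece
                  (pos + PySem.Str.len sub, st.2 ++ [pos])) (0, [])).2
              (fun pp => |ans - pp|)
      rw [if_neg (by simp)]
      rw [pvFoldB sub (p :: q :: ps') 0 []]
      rw [List.nil_append]
      rw [pvMin_eq_fold]
      rw [pvPosOf_cons₂]
      rw [pvFold_map_eq]
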